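-- pv_equiv track=rewrite | github.com/SmiNat/Entertainment | entertainment/utils.py | convert_items_list_to_a_sorted_string
-- ===== SOURCE A (Python) =====
-- def smart_title(text: str, case_type: str | None = None):
--     if case_type in ["upper", "lower", "capitalize", "title"]:
--         return " ".join(getattr(word, case_type)() for word in text.split())
--     return " ".join(
--         word if word.isupper() else word.capitalize() for word in text.split()
--     )
--
-- def convert_items_list_to_a_sorted_string(
--     items: list[str], case_type: str | None = None
-- ) -> str | None:
--     """Converts a list of items into a string of unique sorted items."""
--     if not items:
--         return None
--     items = list(set(smart_title(item.strip(), case_type) for item in items if item))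
--     if items == [None] or items == []:
--         return None
--     items.sort()
--     items_string = ", ".join(items)
--     return items_string
-- ===== SOURCE B (Python) =====
-- _CASE_FUNCS = {"upper": str.upper, "lower": str.lower,
--                "capitalize": str.capitalize, "title": str.title}
--
--
-- def smart_title(text: str, case_type: str | None = None):
--     words = text.split()
--     if case_type in ("upper", "lower", "capitalize", "title"):
--         f = _CASE_FUNCS[case_type]
--     else:
--         f = lambda w: w if w.isupper() else w.capitalize()
--     return " ".join(f(w) for w in words)
--
--
-- def convert_items_list_to_a_sorted_string(
--     items: list[str], case_type: str | None = None
-- ) -> str | None: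
--     if not items:
--         return None
--     processed = sorted(smart_title(it.strip(), case_type) for it in items if it)
--     if not processed:
--         return None
--     result = [processed[0]]
--     for x in processed[1:]:
--         if x != result[-1]:
--             result.append(x)
--     return ", ".join(result)
-- ===== Notes on version B (the rewrite author's own statement) =====
-- stated objective: simpler
-- what changed: B sorts the processed items once and removes duplicates with a single adjacent-comparison scan over the sorted list, instead of A's set() construction followed by list() and sort(), and drops the dead 'items == [None]' check.
import Mathlib
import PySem

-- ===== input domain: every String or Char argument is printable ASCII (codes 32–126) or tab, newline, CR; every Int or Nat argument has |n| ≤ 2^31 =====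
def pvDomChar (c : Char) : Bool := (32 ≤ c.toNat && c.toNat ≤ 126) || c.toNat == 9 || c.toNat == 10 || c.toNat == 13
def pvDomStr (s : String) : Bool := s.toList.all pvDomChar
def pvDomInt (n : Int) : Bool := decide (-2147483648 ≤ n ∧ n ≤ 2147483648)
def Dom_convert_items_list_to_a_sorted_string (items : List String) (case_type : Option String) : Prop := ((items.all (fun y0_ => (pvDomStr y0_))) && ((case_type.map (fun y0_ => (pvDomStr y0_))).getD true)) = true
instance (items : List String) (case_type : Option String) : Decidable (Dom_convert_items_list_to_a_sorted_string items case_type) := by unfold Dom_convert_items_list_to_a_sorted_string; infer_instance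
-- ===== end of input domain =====

-- B replaces A's set()+sort by sort-then-adjacent-dedup (simpler single linear dedup scan over sorted data); return values proved equal on all inputs.

-- shared hand-ported string primitives (PySem has no str.isupper/capitalize/title; exact on the ASCII domain)
-- str.isupper(): at least one cased character and no lowercase one (ASCII: cased = letter)
def pyIsupper (s : String) : Bool :=
  s.toList.any (fun c => PySem.Chars.isalpha c) && s.toList.all (fun c => !(PySem.Chars.islower c))

-- str.capitalize(): first character uppercased, the rest lowercased (exact on ASCII)
def pyCapitalize (s : String) : String :=
  match s.toList with
  | [] => ""
  | c :: t => String.ofList (PySem.Chars.upperChar c :: PySem.Chars.lower t)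

-- str.title(): uppercase a letter after a non-cased character, lowercase after a cased one (exact on ASCII)
def pyTitleGo (prevCased : Bool) : List Char → List Char
  | [] => []
  | c :: t =>
    if PySem.Chars.isalpha c then
      (if prevCased then PySem.Chars.lowerChar c else PySem.Chars.upperChar c) :: pyTitleGo true t
    else c :: pyTitleGo false t

def pyTitle (s : String) : String := String.ofList (pyTitleGo false s.toList)

-- getattr(word, case_type)() for case_type in the four method names
def pyCaseMethod (ct : String) (w : String) : String :=
  if ct = "upper" then PySem.Str.upper w
  else if ct = "lower" then PySem.Str.lower w
  else if ct = "capitalize" then pyCapitalize w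
  else pyTitle w

-- ===== PORT A =====
def smart_title (text : String) (case_type : Option String) : String :=
  if case_type = some "upper" ∨ case_type = some "lower" ∨ case_type = some "capitalize" ∨ case_type = some "title" then
    PySem.Str.join " " ((PySem.Str.split₀ text).map (fun word => pyCaseMethod (case_type.getD "") word))
  else
    PySem.Str.join " " ((PySem.Str.split₀ text).map (fun word => if pyIsupper word then word else pyCapitalize word))

def convert_items_list_to_a_sorted_string (items : List String) (case_type : Option String) : Option String :=
  if items = [] then none
  else
    -- list(set(…)): Python's list order is unspecified, but it is immediately items.sort()-ed,
    -- so sorting the PySem.Set is exact. 'items == [None]' compares strings to None: always False.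
    let items' := PySem.Set.ofList ((items.filter (fun item => item ≠ "")).map
                    (fun item => smart_title (PySem.Str.strip item) case_type))
    if items' = [] then none
    else some (PySem.Str.join ", " (PySem.List.sorted items' (fun x => x)))

-- ===== PORT B =====
def smart_title_b (text : String) (case_type : Option String) : String :=
  let words := PySem.Str.split₀ text
  let f : String → String :=
    if case_type = some "upper" ∨ case_type = some "lower" ∨ case_type = some "capitalize" ∨ case_type = some "title" then
      pyCaseMethod (case_type.getD "")
    else fun w => if pyIsupper w then w else pyCapitalize w
  PySem.Str.join " " (words.map f)

-- the adjacent-dedup loop of Source B: result holds the last kept element at its end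
def dedupAdj (last : String) : List String → List String
  | [] => [last]
  | x :: t => if x = last then dedupAdj last t else last :: dedupAdj x t

def convert_items_list_to_a_sorted_string_alt (items : List String) (case_type : Option String) : Option String :=
  if items = [] then none
  else
    let processed := PySem.List.sorted
      ((items.filter (fun it => it ≠ "")).map (fun it => smart_title_b (PySem.Str.strip it) case_type))
      (fun x => x)
    match processed with
    | [] => none
    | h :: t => some (PySem.Str.join ", " (dedupAdj h t))

-- ===== PRECONDITION & SPEC =====
def Spec_convert_items_list_to_a_sorted_string (items : List String) (case_type : Option String) (out : Option String) : Prop := out = convert_items_list_to_a_sorted_string_alt items case_type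
instance (items : List String) (case_type : Option String) (out : Option String) : Decidable (Spec_convert_items_list_to_a_sorted_string items case_type out) := by unfold Spec_convert_items_list_to_a_sorted_string; infer_instance

-- ===== CLAIM (what is proved, stated in full; the proofs are below) =====
def Claim_equal_convert_items_list_to_a_sorted_string : Prop := ∀ (items : List String) (case_type : Option String), Dom_convert_items_list_to_a_sorted_string items case_type → Spec_convert_items_list_to_a_sorted_string items case_type (convert_items_list_to_a_sorted_string items case_type)

-- ===== LEMMAS AND PROOFS =====
theorem smart_title_eq (text : String) (case_type : Option String) :
    smart_title text case_type = smart_title_b text case_type := by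
  unfold smart_title smart_title_b
  split_ifs <;> rfl

theorem mem_dedupAdj (y h : String) (t : List String) :
    y ∈ dedupAdj h t ↔ y = h ∨ y ∈ t := by
  induction t generalizing h with
  | nil => simp [dedupAdj]
  | cons x t ih =>
    by_cases hx : x = h
    · subst hx
      simp [dedupAdj, ih]
    · simp [dedupAdj, hx, ih]

theorem pairwise_dedupAdj (h : String) (t : List String)
    (hp : (h :: t).Pairwise (· ≤ ·)) : (dedupAdj h t).Pairwise (· < ·) := by
  induction t generalizing h with
  | nil => simp [dedupAdj]
  | cons x t ih =>
    rcases List.pairwise_cons.mp hp with ⟨hh, hp'⟩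
    rcases List.pairwise_cons.mp hp' with ⟨hx, hp''⟩
    by_cases hxh : x = h
    · subst hxh
      simp only [dedupAdj, reduceIte]
      exact ih x (List.pairwise_cons.mpr ⟨hx, hp''⟩)
    · have hlt : h < x := lt_of_le_of_ne (hh x (by simp)) (Ne.symm hxh)
      simp only [dedupAdj, if_neg hxh]
      refine List.pairwise_cons.mpr ⟨?_, ih x (List.pairwise_cons.mpr ⟨hx, hp''⟩)⟩
      intro y hy
      rcases (mem_dedupAdj y x t).mp hy with rfl | hy'
      · exact hlt
      · exact lt_of_lt_of_le hlt (hx y hy')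

theorem nil_iff_ofList_nil {α : Type} [BEq α] [LawfulBEq α] (xs : List α) :
    PySem.Set.ofList xs = [] ↔ xs = [] := by
  constructor
  · intro hnil
    cases xs with
    | nil => rfl
    | cons y ys =>
      have : y ∈ PySem.Set.ofList (y :: ys) := (PySem.Set.mem_ofList _ _).mpr (by simp)
      rw [hnil] at this
      simp at this
  · rintro rfl; rfl

theorem convert_items_list_to_a_sorted_string_spec' (items : List String) (case_type : Option String) :
    convert_items_list_to_a_sorted_string items case_type
      = convert_items_list_to_a_sorted_string_alt items case_type := by
  unfold convert_items_list_to_a_sorted_string convert_items_list_to_a_sorted_string_alt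
  by_cases hnil : items = []
  · simp [hnil]
  · simp only [if_neg hnil]
    set ys : List String :=
      (items.filter (fun it => it ≠ "")).map (fun it => smart_title_b (PySem.Str.strip it) case_type)
      with hys
    have hmapeq : (items.filter (fun item => item ≠ "")).map
        (fun item => smart_title (PySem.Str.strip item) case_type) = ys := by
      rw [hys]
      exact List.map_congr_left (fun it _ => smart_title_eq _ _)
    rw [hmapeq]
    cases hs : PySem.List.sorted ys (fun x => x) with
    | nil =>
      have : ys = [] := (PySem.List.sorted_eq_nil_iff ys (fun x => x) false).mp hs
      rw [if_pos ((nil_iff_ofList_nil ys).mpr this)]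
    | cons h t =>
      have hys_ne : ys ≠ [] := by
        intro hy
        rw [(PySem.List.sorted_eq_nil_iff ys (fun x => x) false).mpr hy] at hs
        exact absurd hs.symm (List.cons_ne_nil h t)
      rw [if_neg (fun hc => hys_ne ((nil_iff_ofList_nil ys).mp hc))]
      have hpair : (h :: t).Pairwise (· ≤ ·) := by
        have := PySem.List.sorted_pairwise ys (fun x => x)
        rw [hs] at this
        exact this
      have hlt : (dedupAdj h t).Pairwise (· < ·) := pairwise_dedupAdj h t hpair
      have hmem : ∀ y, y ∈ dedupAdj h t ↔ y ∈ PySem.Set.ofList ys := by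
        intro y
        rw [mem_dedupAdj, PySem.Set.mem_ofList]
        have := PySem.List.mem_sorted ys (fun x => x) false y
        rw [hs] at this
        simp only [List.mem_cons] at this
        rw [← this]
      have hperm : (dedupAdj h t).Perm (PySem.Set.ofList ys) := by
        refine (List.perm_ext_iff_of_nodup ?_ (PySem.Set.nodup_ofList ys)).mpr hmem
        exact List.Pairwise.imp (fun hab => ne_of_lt hab) hlt
      rw [PySem.List.sorted_eq_of_perm_of_pairwise_lt _ _ _ hperm hlt]

-- ===== VERDICT (by name: the statement is the Claim_ definition above) =====
theorem convert_items_list_to_a_sorted_string_spec : Claim_equal_convert_items_list_to_a_sorted_string := by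
  intro items case_type _
  unfold Spec_convert_items_list_to_a_sorted_string
  exact convert_items_list_to_a_sorted_string_spec' items case_type
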